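-- pv_equiv track=rewrite | github.com/nrtrinid/ev-tracker | backend/services/player_prop_markets.py | get_supported_player_prop_markets
-- ===== SOURCE A (Python) =====
-- PLAYER_PROP_MARKET_SPORTS: dict[str, tuple[str, ...]] = {
--     "player_points": ("basketball_nba",),
--     "player_rebounds": ("basketball_nba",),
--     "player_assists": ("basketball_nba",),
--     "player_points_rebounds_assists": ("basketball_nba",),
--     "player_threes": ("basketball_nba",),
--     "pitcher_strikeouts": ("baseball_mlb",),
--     "pitcher_strikeouts_alternate": ("baseball_mlb",),
--     "batter_total_bases": ("baseball_mlb",),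
--     "batter_total_bases_alternate": ("baseball_mlb",),
--     "batter_hits": ("baseball_mlb",),
--     "batter_hits_alternate": ("baseball_mlb",),
--     "batter_hits_runs_rbis": ("baseball_mlb",),
--     "batter_home_runs": ("baseball_mlb",),
--     "batter_strikeouts": ("baseball_mlb",),
--     "batter_strikeouts_alternate": ("baseball_mlb",),
-- }
--
-- PLAYER_PROP_ALL_MARKETS = list(PLAYER_PROP_MARKET_SPORTS.keys())
--
-- def get_supported_player_prop_markets(sport: str | None = None) -> list[str]:
--     normalized_sport = str(sport or "").strip().lower()
--     if not normalized_sport: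
--         return list(PLAYER_PROP_ALL_MARKETS)
--     return [
--         market_key
--         for market_key, sports in PLAYER_PROP_MARKET_SPORTS.items()
--         if normalized_sport in sports
--     ]
-- ===== SOURCE B (Python) =====
-- PLAYER_PROP_MARKET_SPORTS: dict[str, tuple[str, ...]] = {
--     "player_points": ("basketball_nba",),
--     "player_rebounds": ("basketball_nba",),
--     "player_assists": ("basketball_nba",),
--     "player_points_rebounds_assists": ("basketball_nba",),
--     "player_threes": ("basketball_nba",),
--     "pitcher_strikeouts": ("baseball_mlb",),
--     "pitcher_strikeouts_alternate": ("baseball_mlb",),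
--     "batter_total_bases": ("baseball_mlb",),
--     "batter_total_bases_alternate": ("baseball_mlb",),
--     "batter_hits": ("baseball_mlb",),
--     "batter_hits_alternate": ("baseball_mlb",),
--     "batter_hits_runs_rbis": ("baseball_mlb",),
--     "batter_home_runs": ("baseball_mlb",),
--     "batter_strikeouts": ("baseball_mlb",),
--     "batter_strikeouts_alternate": ("baseball_mlb",),
-- }
--
-- # Reverse index built once at module load: sport -> list of market keys (insertion order)
-- SPORT_INDEX: dict[str, list[str]] = {}
-- for _market_key, _sports in PLAYER_PROP_MARKET_SPORTS.items():
--     for _sport in _sports: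
--         SPORT_INDEX.setdefault(_sport, []).append(_market_key)
--
-- def get_supported_player_prop_markets(sport: str | None = None) -> list[str]:
--     normalized_sport = str(sport or "").strip().lower()
--     if not normalized_sport:
--         return [m for markets in SPORT_INDEX.values() for m in markets]
--     return list(SPORT_INDEX.get(normalized_sport, []))
-- ===== Notes on version B (the rewrite author's own statement) =====
-- stated objective: alternative
-- what changed: B builds a reverse index (sport -> market keys) once at module load and answers each query by a single dict lookup (and, for the empty-sport case, by flattening the index's values), instead of A's per-call scan over all 15 market entries testing tuple membership.
import Mathlib
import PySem

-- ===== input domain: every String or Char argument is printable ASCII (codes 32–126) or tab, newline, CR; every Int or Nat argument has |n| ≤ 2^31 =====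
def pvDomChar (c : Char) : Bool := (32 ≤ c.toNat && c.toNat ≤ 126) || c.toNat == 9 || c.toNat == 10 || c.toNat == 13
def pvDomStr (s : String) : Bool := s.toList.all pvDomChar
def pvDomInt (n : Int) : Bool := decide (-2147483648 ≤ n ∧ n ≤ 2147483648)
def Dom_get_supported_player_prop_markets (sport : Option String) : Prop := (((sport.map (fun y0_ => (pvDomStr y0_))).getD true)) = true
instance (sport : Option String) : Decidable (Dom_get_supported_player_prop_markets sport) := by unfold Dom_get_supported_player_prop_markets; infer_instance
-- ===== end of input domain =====

-- B replaces A's per-call scan over all market entries by a one-time reverse index (sport -> market keys)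
-- consulted with a single lookup; equivalence of the two is proved for every input.

-- ===== PORT A =====
-- PLAYER_PROP_MARKET_SPORTS as an insertion-ordered association list (dict of tuples)
def pvMarketSports : List (String × List String) :=
  [ ("player_points", ["basketball_nba"])
  , ("player_rebounds", ["basketball_nba"])
  , ("player_assists", ["basketball_nba"])
  , ("player_points_rebounds_assists", ["basketball_nba"])
  , ("player_threes", ["basketball_nba"])
  , ("pitcher_strikeouts", ["baseball_mlb"])
  , ("pitcher_strikeouts_alternate", ["baseball_mlb"])
  , ("batter_total_bases", ["baseball_mlb"])
  , ("batter_total_bases_alternate", ["baseball_mlb"])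
  , ("batter_hits", ["baseball_mlb"])
  , ("batter_hits_alternate", ["baseball_mlb"])
  , ("batter_hits_runs_rbis", ["baseball_mlb"])
  , ("batter_home_runs", ["baseball_mlb"])
  , ("batter_strikeouts", ["baseball_mlb"])
  , ("batter_strikeouts_alternate", ["baseball_mlb"]) ]

def pvAllMarkets : List String := pvMarketSports.map Prod.fst

def get_supported_player_prop_markets (sport : Option String) : List String :=
  let normalized_sport := PySem.Str.lower (PySem.Str.strip (sport.getD ""))
  if normalized_sport = "" then pvAllMarkets
  else (pvMarketSports.filter (fun p => p.2.contains normalized_sport)).map Prod.fst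

-- ===== PORT B =====
-- SPORT_INDEX, the reverse index built once at module load (insertion order preserved)
def pvSportIndex : PySem.Dict String (List String) :=
  PySem.Dict.mk
    [ ("basketball_nba",
        [ "player_points", "player_rebounds", "player_assists"
        , "player_points_rebounds_assists", "player_threes" ])
    , ("baseball_mlb",
        [ "pitcher_strikeouts", "pitcher_strikeouts_alternate"
        , "batter_total_bases", "batter_total_bases_alternate"
        , "batter_hits", "batter_hits_alternate", "batter_hits_runs_rbis"
        , "batter_home_runs", "batter_strikeouts", "batter_strikeouts_alternate" ]) ]

def get_supported_player_prop_markets_alt (sport : Option String) : List String :=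
  let normalized_sport := PySem.Str.lower (PySem.Str.strip (sport.getD ""))
  if normalized_sport = "" then (PySem.Dict.values pvSportIndex).flatten
  else PySem.Dict.getD pvSportIndex normalized_sport []

-- ===== PRECONDITION & SPEC =====
def Spec_get_supported_player_prop_markets (sport : Option String) (out : List String) : Prop := out = get_supported_player_prop_markets_alt sport
instance (sport : Option String) (out : List String) : Decidable (Spec_get_supported_player_prop_markets sport out) := by unfold Spec_get_supported_player_prop_markets; infer_instance

-- ===== CLAIM (what is proved, stated in full; the proofs are below) =====
def Claim_equal_get_supported_player_prop_markets : Prop := ∀ (sport : Option String), Dom_get_supported_player_prop_markets sport → Spec_get_supported_player_prop_markets sport (get_supported_player_prop_markets sport)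

-- ===== LEMMAS AND PROOFS =====

-- For every non-empty normalized sport string, A's scan and B's index lookup agree.
theorem pv_scan_eq_lookup (s : String) (hs : s ≠ "") :
    (pvMarketSports.filter (fun p => p.2.contains s)).map Prod.fst
      = PySem.Dict.getD pvSportIndex s [] := by
  by_cases h1 : s = "basketball_nba"
  · subst h1; decide
  · by_cases h2 : s = "baseball_mlb"
    · subst h2; decide
    · simp [pvMarketSports, pvSportIndex, PySem.Dict.getD, PySem.Dict.get?, List.find?,
        h1, h2,
        show ("basketball_nba" == s) = false by simpa using (Ne.symm h1),
        show ("baseball_mlb" == s) = false by simpa using (Ne.symm h2)]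

-- ===== VERDICT (by name: the statement is the Claim_ definition above) =====
theorem get_supported_player_prop_markets_spec : Claim_equal_get_supported_player_prop_markets := by
  intro sport _
  unfold Spec_get_supported_player_prop_markets
  unfold get_supported_player_prop_markets get_supported_player_prop_markets_alt
  set s := PySem.Str.lower (PySem.Str.strip (sport.getD "")) with hs
  by_cases h : s = ""
  · simp only [if_pos h]
    decide
  · simp only [if_neg h]
    exact pv_scan_eq_lookup s h
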